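-- pv_equiv track=rewrite | github.com/nandhiniram33/NextGen_Price_Analyzer | enricher.py | _infer_features_from_row
-- ===== SOURCE A (Python) =====
-- from typing import List, Dict, Any
--
-- def _infer_features_from_row(row: Dict[str, Any]) -> List[str]:
--     features = set()
--     # simple inference rules from common spec keys
--     text = " ".join([str(row.get(k, "")) for k in ["display", "processor", "battery", "storage", "ram", "camera"]]).lower()
--     if "oled" in text or "amoled" in text:
--         features.add("oled_display")
--     if "ips" in text:
--         features.add("ips_display")
--     if "fast" in text and "charge" in text:
--         features.add("fast_charging")
--     if "waterproof" in text or "ip67" in text or "ip68" in text: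
--         features.add("water_resistant")
--     if "dual sim" in text or "sim" in text:
--         features.add("dual_sim")
--     if any(x in text for x in ["4gb", "6gb", "8gb", "12gb"]):
--         features.add("ample_ram")
--     if "ssd" in text or "nvme" in text:
--         features.add("ssd_storage")
--     return sorted(features)
-- ===== SOURCE B (Python) =====
-- from typing import List, Dict, Any
--
-- # Declarative rules table, listed in alphabetical tag order: each tag maps to a
-- # disjunction of conjunctions of substrings.
-- _RULES = [
--     ("ample_ram", [["4gb"], ["6gb"], ["8gb"], ["12gb"]]),
--     ("dual_sim", [["dual sim"], ["sim"]]),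
--     ("fast_charging", [["fast", "charge"]]),
--     ("ips_display", [["ips"]]),
--     ("oled_display", [["oled"], ["amoled"]]),
--     ("ssd_storage", [["ssd"], ["nvme"]]),
--     ("water_resistant", [["waterproof"], ["ip67"], ["ip68"]]),
-- ]
--
-- def _infer_features_from_row(row: Dict[str, Any]) -> List[str]:
--     text = " ".join([str(row.get(k, "")) for k in ["display", "processor", "battery", "storage", "ram", "camera"]]).lower()
--     return [tag for tag, clauses in _RULES
--             if any(all(sub in text for sub in clause) for clause in clauses)]
-- ===== Notes on version B (the rewrite author's own statement) =====
-- stated objective: idiomatic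
-- what changed: Replaces the hardcoded if-chain plus set plus final sort with a single pass over a declarative rules table (tag -> disjunction of conjunctions of substrings) kept in alphabetical tag order, so the output is built already sorted and no set or sort is needed.
import Mathlib
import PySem

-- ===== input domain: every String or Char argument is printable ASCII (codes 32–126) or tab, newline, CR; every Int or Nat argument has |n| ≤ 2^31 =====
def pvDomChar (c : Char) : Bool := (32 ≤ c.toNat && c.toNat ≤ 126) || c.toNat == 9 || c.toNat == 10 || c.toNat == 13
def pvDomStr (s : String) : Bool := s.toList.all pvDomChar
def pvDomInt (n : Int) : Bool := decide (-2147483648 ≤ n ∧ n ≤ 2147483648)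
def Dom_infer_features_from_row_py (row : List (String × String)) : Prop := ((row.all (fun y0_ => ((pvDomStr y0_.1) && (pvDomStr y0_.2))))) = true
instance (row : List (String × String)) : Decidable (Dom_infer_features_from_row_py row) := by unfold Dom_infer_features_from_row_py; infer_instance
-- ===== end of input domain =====

-- ===== PORT A =====
-- B replaces A's hardcoded if-chain + set + sort with one pass over a declarative
-- rules table kept in alphabetical tag order (objective: idiomatic).
-- shared preprocessing: text = " ".join(str(row.get(k,"")) for k in [...]).lower()
def pvText (row : List (String × String)) : String :=
  PySem.Str.lower (PySem.Str.join " "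
    ((["display", "processor", "battery", "storage", "ram", "camera"]).map
      (fun k => PySem.Dict.getD (PySem.Dict.mk row) k "")))

def infer_features_from_row_py (row : List (String × String)) : List String :=
  let text := pvText row
  let features : PySem.Set String := PySem.Set.empty
  let features := if PySem.Str.isIn "oled" text || PySem.Str.isIn "amoled" text then
    PySem.Set.add features "oled_display" else features
  let features := if PySem.Str.isIn "ips" text then
    PySem.Set.add features "ips_display" else features
  let features := if PySem.Str.isIn "fast" text && PySem.Str.isIn "charge" text then
    PySem.Set.add features "fast_charging" else features
  let features := if PySem.Str.isIn "waterproof" text || (PySem.Str.isIn "ip67" text || PySem.Str.isIn "ip68" text) then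
    PySem.Set.add features "water_resistant" else features
  let features := if PySem.Str.isIn "dual sim" text || PySem.Str.isIn "sim" text then
    PySem.Set.add features "dual_sim" else features
  let features := if (["4gb", "6gb", "8gb", "12gb"]).any (fun x => PySem.Str.isIn x text) then
    PySem.Set.add features "ample_ram" else features
  let features := if PySem.Str.isIn "ssd" text || PySem.Str.isIn "nvme" text then
    PySem.Set.add features "ssd_storage" else features
  PySem.List.sorted features (fun x => x) false

-- ===== PORT B =====
-- the rules table: tag -> disjunction of conjunctions of substrings, in tag order
def pvRules : List (String × List (List String)) :=
  [ ("ample_ram", [["4gb"], ["6gb"], ["8gb"], ["12gb"]]),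
    ("dual_sim", [["dual sim"], ["sim"]]),
    ("fast_charging", [["fast", "charge"]]),
    ("ips_display", [["ips"]]),
    ("oled_display", [["oled"], ["amoled"]]),
    ("ssd_storage", [["ssd"], ["nvme"]]),
    ("water_resistant", [["waterproof"], ["ip67"], ["ip68"]]) ]

def infer_features_from_row_py_alt (row : List (String × String)) : List String :=
  let text := pvText row
  (pvRules.filter
    (fun p => p.2.any (fun cl => cl.all (fun sub => PySem.Str.isIn sub text)))).map (fun p => p.1)

-- ===== PRECONDITION & SPEC =====
def Spec_infer_features_from_row_py (row : List (String × String)) (out : List String) : Prop := out = infer_features_from_row_py_alt row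
instance (row : List (String × String)) (out : List String) : Decidable (Spec_infer_features_from_row_py row out) := by unfold Spec_infer_features_from_row_py; infer_instance

-- ===== CLAIM (what is proved, stated in full; the proofs are below) =====
def Claim_equal_infer_features_from_row_py : Prop := ∀ (row : List (String × String)), Dom_infer_features_from_row_py row → Spec_infer_features_from_row_py row (infer_features_from_row_py row)

-- ===== LEMMAS AND PROOFS =====
-- Both results depend on the input only through the joined lowered text; case-split
-- on the seven feature conditions and evaluate both sides in each branch.
lemma pv_core (t : String) :
    (let features : PySem.Set String := PySem.Set.empty
     let features := if PySem.Str.isIn "oled" t || PySem.Str.isIn "amoled" t then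
       PySem.Set.add features "oled_display" else features
     let features := if PySem.Str.isIn "ips" t then
       PySem.Set.add features "ips_display" else features
     let features := if PySem.Str.isIn "fast" t && PySem.Str.isIn "charge" t then
       PySem.Set.add features "fast_charging" else features
     let features := if PySem.Str.isIn "waterproof" t || (PySem.Str.isIn "ip67" t || PySem.Str.isIn "ip68" t) then
       PySem.Set.add features "water_resistant" else features
     let features := if PySem.Str.isIn "dual sim" t || PySem.Str.isIn "sim" t then
       PySem.Set.add features "dual_sim" else features
     let features := if (["4gb", "6gb", "8gb", "12gb"]).any (fun x => PySem.Str.isIn x t) then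
       PySem.Set.add features "ample_ram" else features
     let features := if PySem.Str.isIn "ssd" t || PySem.Str.isIn "nvme" t then
       PySem.Set.add features "ssd_storage" else features
     PySem.List.sorted features (fun x => x) false) =
    (pvRules.filter
      (fun p => p.2.any (fun cl => cl.all (fun sub => PySem.Str.isIn sub t)))).map (fun p => p.1) := by
  simp only [pvRules, List.filter_cons, List.filter_nil, List.any_cons, List.any_nil,
             List.all_cons, List.all_nil, Bool.and_true, Bool.or_false]
  cases (PySem.Str.isIn "oled" t || PySem.Str.isIn "amoled" t) <;>
  cases (PySem.Str.isIn "ips" t) <;>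
  cases (PySem.Str.isIn "fast" t && PySem.Str.isIn "charge" t) <;>
  cases (PySem.Str.isIn "waterproof" t || (PySem.Str.isIn "ip67" t || PySem.Str.isIn "ip68" t)) <;>
  cases (PySem.Str.isIn "dual sim" t || PySem.Str.isIn "sim" t) <;>
  cases (PySem.Str.isIn "4gb" t || (PySem.Str.isIn "6gb" t || (PySem.Str.isIn "8gb" t || PySem.Str.isIn "12gb" t))) <;>
  cases (PySem.Str.isIn "ssd" t || PySem.Str.isIn "nvme" t) <;>
  simp [PySem.Set.add, PySem.Set.empty,
        PySem.List.sorted_eq_foldl_insertBy, PySem.List.insertBy] <;> decide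

-- ===== VERDICT (by name: the statement is the Claim_ definition above) =====
theorem infer_features_from_row_py_spec : Claim_equal_infer_features_from_row_py := by
  intro row _
  unfold Spec_infer_features_from_row_py infer_features_from_row_py infer_features_from_row_py_alt
  exact pv_core (pvText row)
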